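-- pv_equiv track=rewrite | github.com/DavidCoenFish/game05 | tools/python/drag_drop_ww_cpp_style/abstract_syntax_tree/dsc_token_cpp.py | IsIntegerLiteral
-- ===== SOURCE A (Python) =====
-- def IsIntegerLiteral(in_forward_sting):
--     value = ""
--     index = 0
--     # decimal-literal
--     if in_forward_sting[index] in set({"1","2","3","4","5","6","7","8","9"}):
--         value += in_forward_sting[index]
--         index += 1
--         in_digits = True
--         while index < len(in_forward_sting):
--             c = in_forward_sting[index]
--             if c in set({"0","1","2","3","4","5","6","7","8","9","'"}):
--                 index += 1
--                 value += c
--             else: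
--                 break
--
--     # hex
--     elif in_forward_sting[index:].startswith("0x") or in_forward_sting[index:].startswith("0X"):
--         value += in_forward_sting[:2]
--         index += 2
--         while index < len(in_forward_sting):
--             c = in_forward_sting[index]
--             if c in set({"0","1","2","3","4","5","6","7","8","9","a","A","b","B","c","C","d","D","e","E","f","F", "'"}):
--                 index += 1
--                 value += c
--             else:
--                 break
--
--     # binary
--     elif in_forward_sting[index:].startswith("0b") or in_forward_sting[index:].startswith("0B"):
--         value += in_forward_sting[:2]
--         index += 2
--         while index < len(in_forward_sting):
--             c = in_forward_sting[index]
--             if c in set({"0","1","'"}):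
--                 index += 1
--                 value += c
--             else:
--                 break
--
--     # octal
--     elif in_forward_sting[index:].startswith("0"):
--         value += in_forward_sting[:1]
--         index += 1
--         while index < len(in_forward_sting):
--             c = in_forward_sting[index]
--             if c in set({"0","1","2","3","4","5","6","7","8", "'"}):
--                 index += 1
--                 value += c
--             else:
--                 break
--
--     else:
--         return ""
--
--     #suffix
--     while index < len(in_forward_sting):
--         found = False
--         for key in ("ll","LL","u","U","l","L","z","Z"):
--             if in_forward_sting[index:].startswith(key):
--                 value += key
--                 index += len(key)
--                 found = True
--                 break
--         if False == found:
--             break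
--
--     return value
-- ===== SOURCE B (Python) =====
-- # A table-driven finite automaton: one pass over the string, state = literal kind.
-- _TRANS = {
--     "start": (("123456789", "dec"), ("0", "zero")),
--     "dec":   (("0123456789'", "dec"), ("lLuUzZ", "suf")),
--     "zero":  (("xX", "hex"), ("bB", "bin"), ("012345678'", "oct"), ("lLuUzZ", "suf")),
--     "hex":   (("0123456789abcdefABCDEF'", "hex"), ("lLuUzZ", "suf")),
--     "bin":   (("01'", "bin"), ("lLuUzZ", "suf")),
--     "oct":   (("012345678'", "oct"), ("lLuUzZ", "suf")),
--     "suf":   (("lLuUzZ", "suf"),),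
-- }
--
--
-- def IsIntegerLiteral(in_forward_sting):
--     state = "start"
--     for i, ch in enumerate(in_forward_sting):
--         for chars, nxt in _TRANS[state]:
--             if ch in chars:
--                 state = nxt
--                 break
--         else:
--             return "" if state == "start" else in_forward_sting[:i]
--     return "" if state == "start" else in_forward_sting
-- ===== Notes on version B (the rewrite author's own statement) =====
-- stated objective: alternative
-- what changed: Replaces A's branch-per-base structure (four digit loops plus a separate greedy suffix loop) by a single table-driven finite automaton: one pass over the characters with an explicit state (start/dec/zero/hex/bin/oct/suf) and a transition table, returning a slice at the first rejecting character.
import Mathlib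
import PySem

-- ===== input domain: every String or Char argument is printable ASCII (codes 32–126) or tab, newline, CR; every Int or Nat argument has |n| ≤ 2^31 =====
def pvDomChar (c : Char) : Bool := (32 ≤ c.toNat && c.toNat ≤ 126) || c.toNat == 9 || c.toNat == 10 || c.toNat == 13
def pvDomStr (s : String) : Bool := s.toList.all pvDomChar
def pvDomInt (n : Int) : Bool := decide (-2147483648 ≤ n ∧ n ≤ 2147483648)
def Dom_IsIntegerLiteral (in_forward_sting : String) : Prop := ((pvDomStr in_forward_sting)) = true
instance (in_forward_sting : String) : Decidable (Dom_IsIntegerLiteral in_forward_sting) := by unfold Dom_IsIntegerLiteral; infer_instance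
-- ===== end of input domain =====

-- B replaces A's branch-per-base loops (four digit loops + a greedy suffix loop) by a
-- single one-pass table-driven finite automaton (objective: alternative, same cost).

-- ===== PORT A =====
-- A's four digit loops, each accumulating into `value` and returning the remaining chars.
def aDecLoop (value : List Char) (rest : List Char) : List Char × List Char :=
  match rest with
  | [] => (value, [])
  | c :: r =>
    if c ∈ ['0','1','2','3','4','5','6','7','8','9','\''] then aDecLoop (value ++ [c]) r
    else (value, c :: r)

def aHexLoop (value : List Char) (rest : List Char) : List Char × List Char :=
  match rest with
  | [] => (value, [])
  | c :: r =>
    if c ∈ ['0','1','2','3','4','5','6','7','8','9','a','A','b','B','c','C','d','D','e','E','f','F','\''] then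
      aHexLoop (value ++ [c]) r
    else (value, c :: r)

def aBinLoop (value : List Char) (rest : List Char) : List Char × List Char :=
  match rest with
  | [] => (value, [])
  | c :: r =>
    if c ∈ ['0','1','\''] then aBinLoop (value ++ [c]) r
    else (value, c :: r)

def aOctLoop (value : List Char) (rest : List Char) : List Char × List Char :=
  match rest with
  | [] => (value, [])
  | c :: r =>
    if c ∈ ['0','1','2','3','4','5','6','7','8','\''] then aOctLoop (value ++ [c]) r
    else (value, c :: r)

-- A's suffix loop: greedily consume "ll","LL","u","U","l","L","z","Z" in this order.
def aSuffixLoop (value : List Char) (rest : List Char) : List Char :=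
  match rest with
  | 'l' :: 'l' :: r => aSuffixLoop (value ++ ['l','l']) r
  | 'L' :: 'L' :: r => aSuffixLoop (value ++ ['L','L']) r
  | 'u' :: r => aSuffixLoop (value ++ ['u']) r
  | 'U' :: r => aSuffixLoop (value ++ ['U']) r
  | 'l' :: r => aSuffixLoop (value ++ ['l']) r
  | 'L' :: r => aSuffixLoop (value ++ ['L']) r
  | 'z' :: r => aSuffixLoop (value ++ ['z']) r
  | 'Z' :: r => aSuffixLoop (value ++ ['Z']) r
  | _ => value

def IsIntegerLiteral (in_forward_sting : String) : String :=
  match in_forward_sting.toList with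
  | [] => ""   -- Python raises IndexError here; excluded by Pre_
  | c :: rest =>
    let l := c :: rest
    if c ∈ ['1','2','3','4','5','6','7','8','9'] then
      let p := aDecLoop [c] rest
      String.ofList (aSuffixLoop p.1 p.2)
    else if ['0','x'].isPrefixOf l || ['0','X'].isPrefixOf l then
      let p := aHexLoop (l.take 2) (l.drop 2)
      String.ofList (aSuffixLoop p.1 p.2)
    else if ['0','b'].isPrefixOf l || ['0','B'].isPrefixOf l then
      let p := aBinLoop (l.take 2) (l.drop 2)
      String.ofList (aSuffixLoop p.1 p.2)
    else if ['0'].isPrefixOf l then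
      let p := aOctLoop (l.take 1) (l.drop 1)
      String.ofList (aSuffixLoop p.1 p.2)
    else ""

-- ===== PORT B =====
-- B's automaton states (the string keys of _TRANS in Source B).
inductive BState : Type
  | start | dec | zero | hex | bin | oct | suf
  deriving DecidableEq, Repr

-- the transition table _TRANS: for each state, its rows tried in order (inner for-loop);
-- `ch in chars` membership becomes list membership. Exact.
def bTrans : BState → Char → Option BState
  | .start, c =>
    if c ∈ ['1','2','3','4','5','6','7','8','9'] then some .dec
    else if c ∈ ['0'] then some .zero else none
  | .dec, c =>
    if c ∈ ['0','1','2','3','4','5','6','7','8','9','\''] then some .dec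
    else if c ∈ ['l','L','u','U','z','Z'] then some .suf else none
  | .zero, c =>
    if c ∈ ['x','X'] then some .hex
    else if c ∈ ['b','B'] then some .bin
    else if c ∈ ['0','1','2','3','4','5','6','7','8','\''] then some .oct
    else if c ∈ ['l','L','u','U','z','Z'] then some .suf else none
  | .hex, c =>
    if c ∈ ['0','1','2','3','4','5','6','7','8','9','a','b','c','d','e','f','A','B','C','D','E','F','\''] then some .hex
    else if c ∈ ['l','L','u','U','z','Z'] then some .suf else none
  | .bin, c =>
    if c ∈ ['0','1','\''] then some .bin
    else if c ∈ ['l','L','u','U','z','Z'] then some .suf else none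
  | .oct, c =>
    if c ∈ ['0','1','2','3','4','5','6','7','8','\''] then some .oct
    else if c ∈ ['l','L','u','U','z','Z'] then some .suf else none
  | .suf, c =>
    if c ∈ ['l','L','u','U','z','Z'] then some .suf else none

-- the for-loop over enumerate(s): `i` is the current index, `rest` the remaining chars.
def bLoop (full : List Char) (state : BState) (i : Nat) (rest : List Char) : String :=
  match rest with
  | [] => if state = .start then "" else String.ofList full
  | c :: r =>
    match bTrans state c with
    | none => if state = .start then "" else String.ofList (full.take i)
    | some st => bLoop full st (i + 1) r

def IsIntegerLiteral_alt (in_forward_sting : String) : String :=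
  bLoop in_forward_sting.toList .start 0 in_forward_sting.toList

-- ===== PRECONDITION & SPEC =====
-- Pre_ excludes only the empty string, on which Python A raises IndexError.
def Pre_IsIntegerLiteral (in_forward_sting : String) : Prop := in_forward_sting ≠ ""
instance (in_forward_sting : String) : Decidable (Pre_IsIntegerLiteral in_forward_sting) := by
  unfold Pre_IsIntegerLiteral; infer_instance

def pvWitness_IsIntegerLiteral : String := "0x1fLL"

def Spec_IsIntegerLiteral (in_forward_sting : String) (out : String) : Prop :=
  out = IsIntegerLiteral_alt in_forward_sting
instance (in_forward_sting : String) (out : String) : Decidable (Spec_IsIntegerLiteral in_forward_sting out) := by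
  unfold Spec_IsIntegerLiteral; infer_instance

-- ===== CLAIM (what is proved, stated in full; the proofs are below) =====
def Claim_equal_IsIntegerLiteral : Prop := ∀ (in_forward_sting : String), Dom_IsIntegerLiteral in_forward_sting → Pre_IsIntegerLiteral in_forward_sting → Spec_IsIntegerLiteral in_forward_sting (IsIntegerLiteral in_forward_sting)

-- ===== LEMMAS AND PROOFS =====

-- proof-side helpers: lengths of the digit run and the suffix run
def dLen (digits : List Char) (rest : List Char) : Nat :=
  match rest with
  | [] => 0
  | c :: r => if c ∈ digits then 1 + dLen digits r else 0

def sRun (rest : List Char) : Nat :=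
  match rest with
  | [] => 0
  | c :: r => if c ∈ ['l','L','u','U','z','Z'] then 1 + sRun r else 0

-- length consumed by the automaton starting from a given state
def rLen (st : BState) (rest : List Char) : Nat :=
  match rest with
  | [] => 0
  | c :: r =>
    match bTrans st c with
    | none => 0
    | some st' => 1 + rLen st' r

theorem isPrefixOf_iff_take {α : Type} [DecidableEq α] (p l : List α) :
    (p.isPrefixOf l = true) ↔ l.take p.length = p := by
  rw [List.isPrefixOf_iff_prefix, List.prefix_iff_eq_take]; exact eq_comm

theorem aDecLoop_eq (value rest : List Char) :
    aDecLoop value rest =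
      (value ++ rest.take (dLen (['0','1','2','3','4','5','6','7','8','9','\'']) rest),
       rest.drop (dLen (['0','1','2','3','4','5','6','7','8','9','\'']) rest)) := by
  induction value, rest using aDecLoop.induct with
  | case1 v => simp [aDecLoop, dLen]
  | case2 v c r h ih => simp [aDecLoop, dLen, h, ih, Nat.one_add]
  | case3 v c r h => simp [aDecLoop, dLen, h]

theorem aHexLoop_eq (value rest : List Char) :
    aHexLoop value rest =
      (value ++ rest.take (dLen (['0','1','2','3','4','5','6','7','8','9','a','A','b','B','c','C','d','D','e','E','f','F','\'']) rest),
       rest.drop (dLen (['0','1','2','3','4','5','6','7','8','9','a','A','b','B','c','C','d','D','e','E','f','F','\'']) rest)) := by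
  induction value, rest using aHexLoop.induct with
  | case1 v => simp [aHexLoop, dLen]
  | case2 v c r h ih => simp [aHexLoop, dLen, h, ih, Nat.one_add]
  | case3 v c r h => simp [aHexLoop, dLen, h]

theorem aBinLoop_eq (value rest : List Char) :
    aBinLoop value rest =
      (value ++ rest.take (dLen (['0','1','\'']) rest),
       rest.drop (dLen (['0','1','\'']) rest)) := by
  induction value, rest using aBinLoop.induct with
  | case1 v => simp [aBinLoop, dLen]
  | case2 v c r h ih => simp [aBinLoop, dLen, h, ih, Nat.one_add]
  | case3 v c r h => simp [aBinLoop, dLen, h]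

theorem aOctLoop_eq (value rest : List Char) :
    aOctLoop value rest =
      (value ++ rest.take (dLen (['0','1','2','3','4','5','6','7','8','\'']) rest),
       rest.drop (dLen (['0','1','2','3','4','5','6','7','8','\'']) rest)) := by
  induction value, rest using aOctLoop.induct with
  | case1 v => simp [aOctLoop, dLen]
  | case2 v c r h ih => simp [aOctLoop, dLen, h, ih, Nat.one_add]
  | case3 v c r h => simp [aOctLoop, dLen, h]

theorem aSuffixLoop_eq (value rest : List Char) :
    aSuffixLoop value rest = value ++ rest.take (sRun rest) := by
  induction value, rest using aSuffixLoop.induct with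
  | case9 t v h1 h2 h3 h4 h5 h6 h7 h8 =>
    rcases t with _ | ⟨c, r⟩
    · simp [aSuffixLoop, sRun]
    · have hc : c ∉ ['l','L','u','U','z','Z'] := by
        intro hm; fin_cases hm
        · exact h5 r rfl
        · exact h6 r rfl
        · exact h3 r rfl
        · exact h4 r rfl
        · exact h7 r rfl
        · exact h8 r rfl
      have ha : aSuffixLoop v (c :: r) = v := by
        rw [aSuffixLoop] <;> assumption
      simp [ha, sRun, hc]
  | _ => simp_all [aSuffixLoop, sRun, Nat.one_add]

-- bTrans never returns .start
theorem bTrans_ne_start (st : BState) (c : Char) (st' : BState)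
    (h : bTrans st c = some st') : st' ≠ BState.start := by
  cases st <;> simp only [bTrans] at h <;> split_ifs at h <;>
    simp_all <;> subst h <;> simp

-- the automaton loop returns the slice of length i + rLen st rest
theorem bLoop_take (rest : List Char) : ∀ (full : List Char) (st : BState) (i : Nat),
    st ≠ BState.start → rest = full.drop i →
    bLoop full st i rest = String.ofList (full.take (i + rLen st rest)) := by
  induction rest with
  | nil =>
    intro full st i hst hdrop
    have : full.length ≤ i := by
      have := congrArg List.length hdrop
      simp [List.length_drop] at this; omega
    simp [bLoop, hst, rLen, List.take_of_length_le this]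
  | cons c r ih =>
    intro full st i hst hdrop
    cases htr : bTrans st c with
    | none => simp [bLoop, htr, hst, rLen]
    | some st' =>
      have hdrop' : r = full.drop (i + 1) := by
        rw [← List.drop_drop, ← hdrop]; rfl
      have hb : bLoop full st i (c :: r) = bLoop full st' (i + 1) r := by
        rw [bLoop, htr]
      rw [hb, ih full st' (i + 1) (bTrans_ne_start st c st' htr) hdrop']
      have hr : rLen st (c :: r) = 1 + rLen st' r := by rw [rLen, htr]
      rw [hr]; ring_nf

-- from a numeric state, rLen = digit run + suffix run after it
theorem rLen_suf (rest : List Char) : rLen BState.suf rest = sRun rest := by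
  induction rest with
  | nil => rfl
  | cons c r ih => by_cases h : c ∈ ['l','L','u','U','z','Z'] <;> simp [rLen, bTrans, sRun, h, ih]

theorem rLen_num (st : BState) (digits : List Char)
    (hstep : ∀ c, bTrans st c = (if c ∈ digits then some st
      else if c ∈ ['l','L','u','U','z','Z'] then some BState.suf else none)) :
    ∀ rest, rLen st rest = dLen digits rest + sRun (rest.drop (dLen digits rest)) := by
  intro rest
  induction rest with
  | nil => rfl
  | cons c r ih =>
    by_cases hd : c ∈ digits
    · simp [rLen, hstep, hd, dLen, ih, Nat.one_add, Nat.add_assoc]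
    · by_cases hs : c ∈ ['l','L','u','U','z','Z']
      · simp [rLen, hstep, hd, hs, dLen, rLen_suf, sRun]
      · simp [rLen, hstep, hd, hs, dLen, sRun]

theorem rLen_dec : ∀ rest, rLen BState.dec rest =
    dLen (['0','1','2','3','4','5','6','7','8','9','\'']) rest +
    sRun (rest.drop (dLen (['0','1','2','3','4','5','6','7','8','9','\'']) rest)) :=
  rLen_num _ _ (fun _ => rfl)

theorem rLen_hex : ∀ rest, rLen BState.hex rest =
    dLen (['0','1','2','3','4','5','6','7','8','9','a','b','c','d','e','f','A','B','C','D','E','F','\'']) rest +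
    sRun (rest.drop (dLen (['0','1','2','3','4','5','6','7','8','9','a','b','c','d','e','f','A','B','C','D','E','F','\'']) rest)) :=
  rLen_num _ _ (fun _ => rfl)

theorem dLen_congr (d1 d2 : List Char) (h : ∀ c, c ∈ d1 ↔ c ∈ d2) :
    ∀ rest, dLen d1 rest = dLen d2 rest := by
  intro rest
  induction rest with
  | nil => rfl
  | cons c r ih =>
    have hm : (c ∈ d2) = (c ∈ d1) := by
      simp only [eq_iff_iff]; exact (h c).symm
    by_cases hc : c ∈ d1 <;> simp [dLen, hc, hm, ih]

theorem hex_mem (c : Char) :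
    c ∈ ['0','1','2','3','4','5','6','7','8','9','a','A','b','B','c','C','d','D','e','E','f','F','\''] ↔
    c ∈ ['0','1','2','3','4','5','6','7','8','9','a','b','c','d','e','f','A','B','C','D','E','F','\''] := by
  simp; tauto

theorem rLen_bin : ∀ rest, rLen BState.bin rest =
    dLen (['0','1','\'']) rest + sRun (rest.drop (dLen (['0','1','\'']) rest)) :=
  rLen_num _ _ (fun _ => rfl)

theorem rLen_oct : ∀ rest, rLen BState.oct rest =
    dLen (['0','1','2','3','4','5','6','7','8','\'']) rest +
    sRun (rest.drop (dLen (['0','1','2','3','4','5','6','7','8','\'']) rest)) :=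
  rLen_num _ _ (fun _ => rfl)

theorem combine (l : List Char) (n : Nat) (digits : List Char) :
    l.take n ++ ((l.drop n).take (dLen digits (l.drop n)) ++
      ((l.drop n).drop (dLen digits (l.drop n))).take
        (sRun ((l.drop n).drop (dLen digits (l.drop n))))) =
    l.take (n + (dLen digits (l.drop n) +
      sRun ((l.drop n).drop (dLen digits (l.drop n))))) := by
  rw [List.take_add, List.take_add, List.drop_drop]

theorem or_prefix_iff (a₁ a₂ b₁ b₂ : Char) (l : List Char) :
    (([a₁,a₂].isPrefixOf l || [b₁,b₂].isPrefixOf l) = true) ↔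
      (l.take 2 = [a₁,a₂] ∨ l.take 2 = [b₁,b₂]) := by
  rw [Bool.or_eq_true, isPrefixOf_iff_take, isPrefixOf_iff_take]
  norm_num

-- ===== VERDICT (by name: the statement is the Claim_ definition above) =====
-- head characters of `rest` excluded in the octal branch
theorem rLen_zero (rest : List Char) (h : ∀ c r, rest = c :: r → c ∉ ['x','X','b','B']) :
    rLen BState.zero rest = dLen (['0','1','2','3','4','5','6','7','8','\'']) rest +
      sRun (rest.drop (dLen (['0','1','2','3','4','5','6','7','8','\'']) rest)) := by
  cases rest with
  | nil => rfl
  | cons c r =>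
    have hc := h c r rfl
    have h1 : c ∉ ['x','X'] := by intro hm; apply hc; fin_cases hm <;> simp
    have h2 : c ∉ ['b','B'] := by intro hm; apply hc; fin_cases hm <;> simp
    by_cases ho : c ∈ ['0','1','2','3','4','5','6','7','8','\'']
    · simp [rLen, bTrans, h1, h2, ho, dLen, rLen_oct, Nat.one_add, Nat.add_assoc]
    · by_cases hs : c ∈ ['l','L','u','U','z','Z']
      · simp [rLen, bTrans, h1, h2, ho, hs, dLen, rLen_suf, sRun]
      · simp [rLen, bTrans, h1, h2, ho, hs, dLen, sRun]

theorem IsIntegerLiteral_spec : Claim_equal_IsIntegerLiteral := by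
  intro s _ _
  unfold Spec_IsIntegerLiteral IsIntegerLiteral IsIntegerLiteral_alt
  cases h : s.toList with
  | nil => simp [bLoop]
  | cons c rest =>
    simp only
    by_cases h1 : c ∈ ['1','2','3','4','5','6','7','8','9']
    · rw [if_pos h1]
      have ht : bTrans BState.start c = some BState.dec := by fin_cases h1 <;> rfl
      have hstep : bLoop (c :: rest) BState.start 0 (c :: rest) =
          bLoop (c :: rest) BState.dec 1 rest := by rw [bLoop, ht]
      rw [hstep, bLoop_take rest (c :: rest) BState.dec 1 (by decide) rfl, rLen_dec]
      simp only [aDecLoop_eq, aSuffixLoop_eq]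
      have hcomb := combine (c :: rest) 1 (['0','1','2','3','4','5','6','7','8','9','\''])
      simp only [List.take, List.drop] at hcomb ⊢
      rw [List.append_assoc, hcomb]
    · rw [if_neg h1]
      by_cases h2 : List.take 2 (c :: rest) = ['0','x'] ∨ List.take 2 (c :: rest) = ['0','X']
      · rw [if_pos ((or_prefix_iff _ _ _ _ _).mpr h2)]
        rcases rest with _ | ⟨d, r⟩
        · simp [List.take] at h2
        · have hc0 : c = '0' ∧ (d = 'x' ∨ d = 'X') := by
            rcases h2 with h2 | h2 <;> simp [List.take] at h2 <;> tauto
          obtain ⟨rfl, hd⟩ := hc0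
          have ht2 : bTrans BState.zero d = some BState.hex := by
            rcases hd with rfl | rfl <;> rfl
          have hstep : bLoop ('0' :: d :: r) BState.start 0 ('0' :: d :: r) =
              bLoop ('0' :: d :: r) BState.hex 2 r := by
            have e1 : bLoop ('0' :: d :: r) BState.start 0 ('0' :: d :: r) =
                bLoop ('0' :: d :: r) BState.zero 1 (d :: r) := by rw [bLoop]; rfl
            have e2 : bLoop ('0' :: d :: r) BState.zero 1 (d :: r) =
                bLoop ('0' :: d :: r) BState.hex 2 r := by rw [bLoop, ht2]
            rw [e1, e2]
          rw [hstep, bLoop_take r ('0' :: d :: r) BState.hex 2 (by decide) rfl, rLen_hex]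
          simp only [aHexLoop_eq, aSuffixLoop_eq]
          have hdc : ∀ t, dLen (['0','1','2','3','4','5','6','7','8','9','a','A','b','B','c','C','d','D','e','E','f','F','\'']) t =
              dLen (['0','1','2','3','4','5','6','7','8','9','a','b','c','d','e','f','A','B','C','D','E','F','\'']) t :=
            dLen_congr _ _ hex_mem
          have hcomb := combine ('0' :: d :: r) 2 (['0','1','2','3','4','5','6','7','8','9','a','A','b','B','c','C','d','D','e','E','f','F','\''])
          simp only [List.take, List.drop] at hcomb ⊢
          rw [List.append_assoc, hcomb]
          simp only [hdc]
      · rw [if_neg (fun hh => h2 ((or_prefix_iff _ _ _ _ _).mp hh))]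
        by_cases h3 : List.take 2 (c :: rest) = ['0','b'] ∨ List.take 2 (c :: rest) = ['0','B']
        · rw [if_pos ((or_prefix_iff _ _ _ _ _).mpr h3)]
          rcases rest with _ | ⟨d, r⟩
          · simp [List.take] at h3
          · have hc0 : c = '0' ∧ (d = 'b' ∨ d = 'B') := by
              rcases h3 with h3 | h3 <;> simp [List.take] at h3 <;> tauto
            obtain ⟨rfl, hd⟩ := hc0
            have ht2 : bTrans BState.zero d = some BState.bin := by
              rcases hd with rfl | rfl <;> rfl
            have hstep : bLoop ('0' :: d :: r) BState.start 0 ('0' :: d :: r) =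
                bLoop ('0' :: d :: r) BState.bin 2 r := by
              have e1 : bLoop ('0' :: d :: r) BState.start 0 ('0' :: d :: r) =
                  bLoop ('0' :: d :: r) BState.zero 1 (d :: r) := by rw [bLoop]; rfl
              have e2 : bLoop ('0' :: d :: r) BState.zero 1 (d :: r) =
                  bLoop ('0' :: d :: r) BState.bin 2 r := by rw [bLoop, ht2]
              rw [e1, e2]
            rw [hstep, bLoop_take r ('0' :: d :: r) BState.bin 2 (by decide) rfl, rLen_bin]
            simp only [aBinLoop_eq, aSuffixLoop_eq]
            have hcomb := combine ('0' :: d :: r) 2 (['0','1','\''])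
            simp only [List.take, List.drop] at hcomb ⊢
            rw [List.append_assoc, hcomb]
        · rw [if_neg (fun hh => h3 ((or_prefix_iff _ _ _ _ _).mp hh))]
          by_cases h4 : c = '0'
          · subst h4
            have hC : (['0'].isPrefixOf ('0' :: rest)) = true := by simp [List.isPrefixOf]
            rw [if_pos hC]
            have hstep : bLoop ('0' :: rest) BState.start 0 ('0' :: rest) =
                bLoop ('0' :: rest) BState.zero 1 rest := by rw [bLoop]; rfl
            have hhead : ∀ d r', rest = d :: r' → d ∉ (['x','X','b','B'] : List Char) := by
              intro d r' hr hm
              subst hr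
              fin_cases hm
              · exact h2 (Or.inl (by simp [List.take]))
              · exact h2 (Or.inr (by simp [List.take]))
              · exact h3 (Or.inl (by simp [List.take]))
              · exact h3 (Or.inr (by simp [List.take]))
            rw [hstep, bLoop_take rest ('0' :: rest) BState.zero 1 (by decide) rfl,
               rLen_zero rest hhead]
            simp only [aOctLoop_eq, aSuffixLoop_eq]
            have hcomb := combine ('0' :: rest) 1 (['0','1','2','3','4','5','6','7','8','\''])
            simp only [List.take, List.drop] at hcomb ⊢
            rw [List.append_assoc, hcomb]
          · have hC : ¬ (['0'].isPrefixOf (c :: rest) = true) := by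
              simp only [List.isPrefixOf, Bool.and_true, beq_iff_eq]
              exact fun hh => h4 hh.symm
            rw [if_neg hC]
            have htn : bTrans BState.start c = none := by
              simp [bTrans, h1]
              exact fun hh => absurd hh h4
            simp [bLoop, htn]
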